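/- GENERATED by farm/mkstatement.py from design/units.tsv (unit `inverse_mdct.5`) and the assertions of Vorbis/Spec/MdctTop.lean — do not edit.
   THE STATEMENT of the proof unit `inverse_mdct.5`: segment 5 of `inverse_mdct` (70 instructions; entries 0x109729;
   exits 0x10986b; ranges 0x109729-0x109824)
   takes each of its entry assertions to one of its exit assertions (`Vorbis.Spec.inverse_mdct.Seg5`), given the contracts of its callees.
   What the names mean: Vorbis/Spec/Basic.lean (the shared hypotheses), Vorbis/Spec/MdctTop.lean (the assertions). The theorem to prove:
   `theorem inverse_mdct_5_ok : Vorbis.Spec.inverse_mdct_5.Statement`. -/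
import Vorbis.Spec.Leaves2
import Vorbis.Spec.Mdct
import Vorbis.Spec.MdctTop
namespace Vorbis.Spec.inverse_mdct_5
open X86 X86.User Asan

/-- The statement of unit `inverse_mdct.5`. -/
def Statement : Prop :=
  ∀ (Lay : Layout) (_hLay : Lay.hi = 0x1000000) (μ : Microarch) (_hμ : UserX.MicroOK μ) (u₀ : State)
    (_hcode : HasCodeNat Lay u₀ Vorbis.L.inverse_mdct.entry Vorbis.Code.code_inverse_mdct.nat Vorbis.L.inverse_mdct.size)
    (_h_ilog : ∀ (others : List Obj) (frames : List (Nat × FrameLayout)), Calls Lay μ Vorbis.WayInv (Vorbis.conv u₀) Vorbis.L.ilog.entry (Vorbis.Spec.ilog.spec others frames))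
    (_h_imdct_step3_iter0_loop : ∀ (others : List Obj) (frames : List (Nat × FrameLayout)) (len i0 koff : Nat), Calls Lay μ Vorbis.WayInv (Vorbis.conv u₀) Vorbis.L.imdct_step3_iter0_loop.entry (Vorbis.Spec.imdct_step3_iter0_loop.spec others frames len i0 koff))
    (_h_imdct_step3_inner_r_loop : ∀ (others : List Obj) (frames : List (Nat × FrameLayout)) (len i0 koff k1 : Nat), Calls Lay μ Vorbis.WayInv (Vorbis.conv u₀) Vorbis.L.imdct_step3_inner_r_loop.entry (Vorbis.Spec.imdct_step3_inner_r_loop.spec others frames len i0 koff k1)),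
    Vorbis.Spec.inverse_mdct.Seg5 Lay μ u₀

end Vorbis.Spec.inverse_mdct_5
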